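-- pv_equiv track=rewrite | github.com/hyejinny97/Coding-Test | Programmers/Lv.1/신고결과받기.py | solution
-- ===== SOURCE A (Python) =====
-- def solution(id_list, reports, k):
--     user_reporting = dict()  # 각 유저별 신고한 유저 id (사용자 id : {신고당한 id})
--     cnt_reported = dict()  # 각 유저별 신고 당한 횟수 (신고당한 id : 횟수)
--     for report in reports:
--         user_id, reported_id = report.split()
--
--         # 유저별 신고당한 횟수 카운트
--         if reported_id not in user_reporting.get(user_id, []):
--             cnt_reported[reported_id] = cnt_reported.get(reported_id, 0) + 1
--
--         # 유저별 신고한 id 기록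
--         if user_reporting.get(user_id):
--             user_reporting[user_id].add(reported_id)
--         else:
--             user_reporting[user_id] = {reported_id}
--
--     rst = []
--     for user_id in id_list:
--         cnt = 0   # 각 유저가 받은 결과 메일 수
--         for reported_id in user_reporting.get(user_id, []):
--             if cnt_reported.get(reported_id, 0) >= k:
--                 cnt += 1
--         rst.append(cnt)
--
--     return rst
-- ===== SOURCE B (Python) =====
-- def solution(id_list, reports, k):
--     # inverted index: group the distinct reporters per reported id, ban a reported id
--     # by its group's cardinality, then scatter one mail from each banned group to its
--     # reporters (A instead keeps per-reporter sets plus an incremental per-report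
--     # counter and counts per queried user)
--     reporters_of = {}
--     for rep in reports:
--         u, r = rep.split()
--         reporters_of.setdefault(r, set()).add(u)
--     mails = {uid: 0 for uid in id_list}
--     for us in reporters_of.values():
--         if len(us) >= k:
--             for u in us:
--                 if u in mails:
--                     mails[u] += 1
--     return [mails[uid] for uid in id_list]
-- ===== Notes on version B (the rewrite author's own statement) =====
-- stated objective: simpler
-- what changed: Inverts A's data flow: instead of per-reporter sets of reported ids plus an incrementally maintained per-report counter read back per queried user, B builds one inverted index reported-id -> set of distinct reporters, decides banning by the group's cardinality, and scatters one mail from each banned group into a result dict.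
import Mathlib
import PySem

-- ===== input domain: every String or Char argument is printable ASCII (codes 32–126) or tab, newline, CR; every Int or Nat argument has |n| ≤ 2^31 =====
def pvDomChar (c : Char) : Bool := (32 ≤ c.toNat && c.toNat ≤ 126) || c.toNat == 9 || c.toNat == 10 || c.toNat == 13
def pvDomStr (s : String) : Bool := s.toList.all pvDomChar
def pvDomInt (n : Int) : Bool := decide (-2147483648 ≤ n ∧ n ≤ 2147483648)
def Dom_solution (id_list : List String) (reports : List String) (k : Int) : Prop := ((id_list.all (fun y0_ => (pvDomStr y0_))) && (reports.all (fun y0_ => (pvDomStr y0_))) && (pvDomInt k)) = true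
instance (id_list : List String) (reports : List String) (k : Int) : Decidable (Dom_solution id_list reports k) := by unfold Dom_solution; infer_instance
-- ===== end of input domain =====

-- B inverts A's data flow: one inverted index reported-id -> set of distinct reporters, banning by
-- the group's cardinality, and a scatter of one mail per banned group into a result dict, instead
-- of A's per-reporter sets plus an incremental per-report counter read back per queried user
-- (objective: simpler).

-- ===== PORT A =====
-- shared helper: 'user_id, reported_id = report.split()' (both Pythons split a report the same
-- way; Pre_solution guarantees exactly two fields, so the getD defaults are never read)
def pvToPair (rep : String) : String × String :=
  let p := PySem.Str.split₀ rep
  (p.getD 0 "", p.getD 1 "")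

-- loop body of A's first loop, acting on the split pair
def pvStepA (st : PySem.Dict String (PySem.Set String) × PySem.Dict String Int)
    (pr : String × String) :
    PySem.Dict String (PySem.Set String) × PySem.Dict String Int :=
  let user_id := pr.1
  let reported_id := pr.2
  -- if reported_id not in user_reporting.get(user_id, []): cnt_reported[reported_id] = cnt_reported.get(reported_id, 0) + 1
  let cr := if (st.1.getD user_id PySem.Set.empty).contains reported_id = false then
      st.2.insert reported_id (st.2.getD reported_id 0 + 1)
    else st.2
  -- if user_reporting.get(user_id): user_reporting[user_id].add(reported_id)
  -- else: user_reporting[user_id] = {reported_id}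
  -- (the dict value is a set: truthy iff nonempty; a missing key gives falsy None)
  let ur := if st.1.getD user_id PySem.Set.empty ≠ [] then
      st.1.insert user_id ((st.1.getD user_id PySem.Set.empty).add reported_id)
    else st.1.insert user_id (PySem.Set.add PySem.Set.empty reported_id)
  (ur, cr)

def solution (id_list : List String) (reports : List String) (k : Int) : List Int :=
  let st := reports.foldl (fun st report => pvStepA st (pvToPair report))
    (PySem.Dict.empty, PySem.Dict.empty)
  -- for user_id in id_list: cnt = 0; for reported_id in user_reporting.get(user_id, []): … ; rst.append(cnt)
  -- (the inner loop iterates a set, but only to count: the result does not depend on iteration order)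
  id_list.foldl (fun rst user_id =>
    rst ++ [(st.1.getD user_id PySem.Set.empty).foldl
      (fun cnt reported_id => if st.2.getD reported_id 0 ≥ k then cnt + 1 else cnt) (0 : Int)]) []

-- ===== PORT B =====
-- 'reporters_of.setdefault(r, set()).add(u)': the set stored at r gains u — the key keeps its
-- position if present and is appended if new, i.e. insert r ((get r or ∅).add u)
def pvStepB (d : PySem.Dict String (PySem.Set String)) (pr : String × String) :
    PySem.Dict String (PySem.Set String) :=
  d.insert pr.2 ((d.getD pr.2 PySem.Set.empty).add pr.1)

def solution_alt (id_list : List String) (reports : List String) (k : Int) : List Int :=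
  -- reporters_of = {}; for rep in reports: u, r = rep.split(); reporters_of.setdefault(r, set()).add(u)
  let reporters_of := reports.foldl (fun d rep => pvStepB d (pvToPair rep)) PySem.Dict.empty
  -- mails = {uid: 0 for uid in id_list}
  let mails0 := id_list.foldl (fun d uid => d.insert uid (0 : Int)) PySem.Dict.empty
  -- for us in reporters_of.values(): if len(us) >= k: for u in us: if u in mails: mails[u] += 1
  -- (the inner loop iterates a set, but only increments counters: order does not matter)
  let mails := reporters_of.values.foldl
    (fun m us => if PySem.Set.len us ≥ k then
        us.foldl (fun m u => if m.contains u then m.modify u 0 (· + 1) else m) m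
      else m) mails0
  -- return [mails[uid] for uid in id_list]   (every uid of id_list is a key of mails)
  id_list.map (fun uid => mails.getD uid 0)

-- ===== PRECONDITION & SPEC =====
-- Pre_ excludes exactly the inputs containing a report that does not split into two
-- whitespace-separated fields, on which A's 'user_id, reported_id = report.split()' raises ValueError.
def Pre_solution (id_list : List String) (reports : List String) (k : Int) : Prop :=
  ∀ rep ∈ reports, (PySem.Str.split₀ rep).length = 2

instance (id_list : List String) (reports : List String) (k : Int) :
    Decidable (Pre_solution id_list reports k) := by unfold Pre_solution; infer_instance

def pvWitness_solution : List String × List String × Int :=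
  (["muzi", "frodo", "apeach", "neo"],
   ["muzi frodo", "apeach frodo", "frodo neo", "muzi neo", "apeach muzi"], 2)

def Spec_solution (id_list : List String) (reports : List String) (k : Int) (out : List Int) : Prop := out = solution_alt id_list reports k
instance (id_list : List String) (reports : List String) (k : Int) (out : List Int) : Decidable (Spec_solution id_list reports k out) := by unfold Spec_solution; infer_instance

-- ===== CLAIM (what is proved, stated in full; the proofs are below) =====
def Claim_equal_solution : Prop := ∀ (id_list : List String) (reports : List String) (k : Int), Dom_solution id_list reports k → Pre_solution id_list reports k → Spec_solution id_list reports k (solution id_list reports k)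

-- ===== LEMMAS AND PROOFS =====

-- r occurs among the reported-ids that u reported (within the pair list P) iff (u, r) ∈ P
lemma pv_mem_filter_map_snd (P : List (String × String)) (u r : String) :
    r ∈ (P.filter (fun pr => pr.1 == u)).map Prod.snd ↔ (u, r) ∈ P := by
  constructor
  · intro h
    rcases List.mem_map.1 h with ⟨pr, hpr, hr⟩
    rcases List.mem_filter.1 hpr with ⟨hP, hu⟩
    have h1 : pr.1 = u := by simpa using hu
    have h2 : pr = (u, r) := by cases pr; simp_all
    simpa [h2] using hP
  · intro h
    exact List.mem_map.2 ⟨(u, r), List.mem_filter.2 ⟨h, by simp⟩, rfl⟩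

-- u occurs among the reporters of r (within the pair list P) iff (u, r) ∈ P
lemma pv_mem_filter_map_fst (P : List (String × String)) (u r : String) :
    u ∈ (P.filter (fun pr => pr.2 == r)).map Prod.fst ↔ (u, r) ∈ P := by
  constructor
  · intro h
    rcases List.mem_map.1 h with ⟨pr, hpr, hu⟩
    rcases List.mem_filter.1 hpr with ⟨hP, hr⟩
    have h1 : pr.2 = r := by simpa using hr
    have h2 : pr = (u, r) := by cases pr; simp_all
    simpa [h2] using hP
  · intro h
    exact List.mem_map.2 ⟨(u, r), List.mem_filter.2 ⟨h, by simp⟩, rfl⟩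

lemma pv_dedup_append {α : Type} [BEq α] [LawfulBEq α] [DecidableEq α]
    (ms : List α) (p : α) :
    PySem.List.dedup (ms ++ [p]) =
      if p ∈ PySem.List.dedup ms then PySem.List.dedup ms
      else PySem.List.dedup ms ++ [p] := by
  simp only [PySem.List.dedup_eq_ofList, PySem.Set.ofList_eq_foldl, List.foldl_append,
    List.foldl_cons, List.foldl_nil]
  rw [PySem.Set.add]
  by_cases h : p ∈ List.foldl PySem.Set.add [] ms
  · rw [if_pos (by rwa [PySem.Set.contains_iff]), if_pos h]
  · rw [if_neg (by simpa [PySem.Set.contains_iff] using h), if_neg h]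

-- the reporters stored for r, as a function of the deduped pair list
def pvRep (P : List (String × String)) (r : String) : PySem.Set String :=
  (P.filter (fun pr => pr.2 == r)).map Prod.fst

-- the state after B's first loop: the inverted index lists the distinct reported ids in
-- first-occurrence order, each with the distinct reporters of its deduped pairs
lemma pvFoldB_items (ms : List (String × String)) :
    (ms.foldl pvStepB PySem.Dict.empty).items
      = (PySem.List.dedup (ms.map Prod.snd)).map
          (fun r => (r, pvRep (PySem.List.dedup ms) r)) := by
  induction ms using List.reverseRecOn with
  | nil => simp [PySem.List.dedup_eq_ofList, PySem.Set.ofList_eq_foldl, PySem.Dict.empty]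
  | append_singleton ms p ih =>
    have hfold : ((ms ++ [p]).foldl pvStepB PySem.Dict.empty)
        = pvStepB (ms.foldl pvStepB PySem.Dict.empty) p := by
      simp [List.foldl_append]
    set d := ms.foldl pvStepB PySem.Dict.empty with hd
    have hkeys : d.keys = PySem.List.dedup (ms.map Prod.snd) := by
      show d.items.map Prod.fst = _
      rw [ih, List.map_map]
      simp [Function.comp_def]
    have hcon : ∀ x, d.contains x = decide (x ∈ PySem.List.dedup (ms.map Prod.snd)) := by
      intro x
      rw [PySem.Dict.contains_eq_decide_mem_keys, hkeys]
    have hsnd : PySem.List.dedup ((ms ++ [p]).map Prod.snd)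
        = if p.2 ∈ PySem.List.dedup (ms.map Prod.snd) then PySem.List.dedup (ms.map Prod.snd)
          else PySem.List.dedup (ms.map Prod.snd) ++ [p.2] := by
      rw [List.map_append, List.map_singleton, pv_dedup_append]
    rw [hfold, hsnd, pv_dedup_append]
    by_cases hr : p.2 ∈ PySem.List.dedup (ms.map Prod.snd)
    · -- p.2 is already a key
      have hget : d.getD p.2 PySem.Set.empty = pvRep (PySem.List.dedup ms) p.2 := by
        apply PySem.Dict.getD_of_mem_items
        · rw [ih]
          exact List.mem_map.2 ⟨p.2, hr, rfl⟩
        · rw [hkeys]; exact PySem.List.nodup_dedup _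
      rw [if_pos hr]
      show (d.insert p.2 ((d.getD p.2 PySem.Set.empty).add p.1)).items = _
      rw [PySem.Dict.items_insert_of_contains d _ (by rw [hcon]; simpa using hr), ih,
        List.map_map]
      by_cases hp : p ∈ PySem.List.dedup ms
      · -- duplicate pair: nothing changes
        rw [if_pos hp]
        apply List.map_congr_left
        intro r _
        have hu : p.1 ∈ pvRep (PySem.List.dedup ms) p.2 := by
          rw [pvRep, pv_mem_filter_map_fst]
          simpa using hp
        have hget' : d.getD p.2 ([] : List String) = pvRep (PySem.List.dedup ms) p.2 := hget
        by_cases he : r = p.2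
        · subst he
          simp [PySem.Set.add, hget']
          simpa using hu
        · simp [he]
      · -- new pair for a known reported id: its reporter set gains p.1 at the end
        rw [if_neg hp]
        apply List.map_congr_left
        intro r _
        by_cases he : r = p.2
        · subst he
          have hu : p.1 ∉ pvRep (PySem.List.dedup ms) p.2 := by
            rw [pvRep, pv_mem_filter_map_fst, PySem.List.mem_dedup]
            intro hmm
            exact hp (by simpa [PySem.List.mem_dedup] using hmm)
          have hget' : d.getD p.2 ([] : List String) = pvRep (PySem.List.dedup ms) p.2 := hget
          simp [PySem.Set.add, hget', pvRep, List.filter_append]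
          exact fun hm => hp ((PySem.List.mem_dedup _ _).2 hm)
        · have hns : (p.2 == r) = false := by simpa using fun h => he h.symm
          simp [he, pvRep, List.filter_append, hns]
    · -- fresh reported id: appended with the singleton reporter set
      have hp : p ∉ PySem.List.dedup ms := by
        rw [PySem.List.mem_dedup]
        intro hmm
        exact hr (by rw [PySem.List.mem_dedup]; exact List.mem_map.2 ⟨p, hmm, rfl⟩)
      rw [if_neg hr, if_neg hp]
      show (d.insert p.2 ((d.getD p.2 PySem.Set.empty).add p.1)).items = _
      have hget : d.getD p.2 PySem.Set.empty = PySem.Set.empty := by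
        apply PySem.Dict.getD_of_not_contains
        rw [hcon]; simpa using hr
      rw [PySem.Dict.items_insert_of_not_contains d _ (by rw [hcon]; simpa using hr), ih,
        List.map_append, List.map_singleton]
      congr 1
      · apply List.map_congr_left
        intro r hrm
        have hne : r ≠ p.2 := fun h => hr (h ▸ hrm)
        have hns : (p.2 == r) = false := by simpa using fun h => hne h.symm
        simp [pvRep, List.filter_append, hns]
      · have hnil : (PySem.List.dedup ms).filter (fun pr => pr.2 == p.2) = [] := by
          rw [List.filter_eq_nil_iff]
          intro q hq
          simp only [beq_iff_eq]
          intro he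
          exact hr (by
            rw [PySem.List.mem_dedup]
            exact List.mem_map.2 ⟨q, (PySem.List.mem_dedup _ _).1 hq, he⟩)
        rw [hget, pvRep, List.filter_append, hnil, List.nil_append]
        simp [PySem.Set.add, PySem.Set.empty, PySem.Set.contains]

-- '{uid: 0 for uid in id_list}' : lookup in the zero-initialised dict
lemma pvResult0_get? (l : List String) (d : PySem.Dict String Int) (u : String) :
    (l.foldl (fun d uid => d.insert uid (0 : Int)) d).get? u
      = if u ∈ l then some 0 else d.get? u := by
  induction l generalizing d with
  | nil => simp
  | cons a l ih =>
    simp only [List.foldl_cons, ih, PySem.Dict.get?_insert, List.mem_cons]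
    by_cases h : u ∈ l <;> by_cases h' : u = a <;> simp [h, h']

-- B's inner scatter loop preserves the presence of a key …
lemma pvScatter_contains (us : List String) (m : PySem.Dict String Int) (w : String)
    (hw : m.contains w = true) :
    ((us.foldl (fun m u => if m.contains u then m.modify u 0 (· + 1) else m) m).contains w)
      = true := by
  induction us generalizing m with
  | nil => exact hw
  | cons u rest ih =>
    simp only [List.foldl_cons]
    by_cases hc : m.contains u = true
    · rw [if_pos hc]
      exact ih _ (by rw [PySem.Dict.contains_modify]; simp [hw])
    · rw [if_neg hc]
      exact ih _ hw

-- … and adds, to an existing key, the number of its occurrences in the iterated set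
lemma pvScatter_getD (us : List String) (m : PySem.Dict String Int) (w : String)
    (hw : m.contains w = true) :
    ((us.foldl (fun m u => if m.contains u then m.modify u 0 (· + 1) else m) m).getD w 0)
      = m.getD w 0 + (us.count w : Int) := by
  induction us generalizing m with
  | nil => simp
  | cons u rest ih =>
    simp only [List.foldl_cons, List.count_cons]
    by_cases hc : m.contains u = true
    · rw [if_pos hc, ih _ (by rw [PySem.Dict.contains_modify]; simp [hw]),
        PySem.Dict.getD_modify]
      by_cases he : w = u
      · subst he
        rw [if_pos rfl]
        simp
        ring
      · rw [if_neg he]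
        have : (u == w) = false := by simpa using fun h => he h.symm
        simp [this]
    · rw [if_neg hc, ih _ hw]
      have : (u == w) = false := by
        cases hb : (u == w)
        · rfl
        · exact absurd (by rw [← (by simpa using hb : u = w)] at hw; exact hw) hc
      simp [this]

-- B's banned-group loop: an existing key ends at its number of banned groups containing it
lemma pvBanScatter (k : Int) (V : List (PySem.Set String))
    (hV : ∀ us ∈ V, List.Nodup us) (m : PySem.Dict String Int) (w : String)
    (hw : m.contains w = true) :
    ((V.foldl (fun m us => if PySem.Set.len us ≥ k then
        us.foldl (fun m u => if m.contains u then m.modify u 0 (· + 1) else m) m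
      else m) m).getD w 0)
      = m.getD w 0
        + (V.countP (fun us => decide (PySem.Set.len us ≥ k) && us.contains w) : Int) := by
  induction V generalizing m with
  | nil => simp
  | cons us rest ih =>
    have hVr : ∀ x ∈ rest, List.Nodup x := fun x hx => hV x (List.mem_cons_of_mem _ hx)
    simp only [List.foldl_cons, List.countP_cons]
    by_cases hb : PySem.Set.len us ≥ k
    · rw [if_pos hb, ih hVr _ (pvScatter_contains us m w hw), pvScatter_getD us m w hw]
      have hcnt : (us.count w : Int) = if us.contains w = true then 1 else 0 := by
        by_cases hm : w ∈ us
        · rw [if_pos ((PySem.Set.contains_iff _ _).2 hm),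
            List.count_eq_one_of_mem (hV us (List.mem_cons_self)) hm]
          simp
        · rw [if_neg (fun h => hm ((PySem.Set.contains_iff _ _).1 h)),
            List.count_eq_zero.2 hm]
          simp
      rw [hcnt]
      have hdb : decide (PySem.Set.len us ≥ k) = true := by simpa using hb
      by_cases hc : us.contains w = true
      · rw [if_pos hc]
        simp only [hdb, hc, Bool.true_and, if_true]
        push_cast
        ring
      · rw [if_neg hc]
        simp only [hdb, Bool.true_and]
        rw [if_neg hc]
        push_cast
        ring
    · rw [if_neg hb, ih hVr _ hw]
      have hdb : decide (PySem.Set.len us ≥ k) = false := by simpa using hb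
      simp only [hdb, Bool.false_and, if_neg (by simp : ¬ (false = true))]
      push_cast
      ring

-- the counting bijection between the two traversal orders: pairs of a fixed reporter,
-- versus distinct reported ids whose group contains the reporter (c depends on the
-- reported id only; P has no duplicate pairs)
lemma pv_count_bridge (P : List (String × String)) (hP : P.Nodup) (uid : String)
    (c : String → Bool) (K : List String) (hK : K.Nodup)
    (hKm : ∀ r, r ∈ K ↔ r ∈ P.map Prod.snd) :
    (P.countP (fun pr => pr.1 == uid && c pr.2) : Int)
      = (K.countP (fun r => c r && decide ((uid, r) ∈ P)) : Int) := by
  have h1 : P.countP (fun pr => pr.1 == uid && c pr.2)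
      = ((P.filter (fun pr => pr.1 == uid && c pr.2)).map Prod.snd).length := by
    rw [List.length_map, ← List.countP_eq_length_filter]
  have h2 : K.countP (fun r => c r && decide ((uid, r) ∈ P))
      = (K.filter (fun r => c r && decide ((uid, r) ∈ P))).length := by
    rw [← List.countP_eq_length_filter]
  rw [h1, h2]
  congr 1
  apply List.Perm.length_eq
  have hn1 : ((P.filter (fun pr => pr.1 == uid && c pr.2)).map Prod.snd).Nodup := by
    apply List.Nodup.map_on
    · intro x hx y hy hxy
      have hx1 : x.1 = uid := by
        have := (List.mem_filter.1 hx).2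
        simp only [Bool.and_eq_true, beq_iff_eq] at this
        exact this.1
      have hy1 : y.1 = uid := by
        have := (List.mem_filter.1 hy).2
        simp only [Bool.and_eq_true, beq_iff_eq] at this
        exact this.1
      cases x; cases y; simp_all
    · exact hP.filter _
  have hn2 : (K.filter (fun r => c r && decide ((uid, r) ∈ P))).Nodup :=
    hK.filter _
  rw [List.perm_ext_iff_of_nodup hn1 hn2]
  intro r
  constructor
  · intro h
    rcases List.mem_map.1 h with ⟨pr, hpr, hr⟩
    rcases List.mem_filter.1 hpr with ⟨hmem, hcond⟩
    simp only [Bool.and_eq_true, beq_iff_eq] at hcond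
    have hpr2 : pr = (uid, r) := by cases pr; simp_all
    subst hpr2
    apply List.mem_filter.2
    refine ⟨?_, ?_⟩
    · exact (hKm r).2 (List.mem_map.2 ⟨(uid, r), hmem, rfl⟩)
    · simp only [Bool.and_eq_true, decide_eq_true_eq]
      exact ⟨hcond.2, hmem⟩
  · intro h
    rcases List.mem_filter.1 h with ⟨_, hcond⟩
    simp only [Bool.and_eq_true, decide_eq_true_eq] at hcond
    apply List.mem_map.2
    exact ⟨(uid, r), List.mem_filter.2 ⟨hcond.2, by simp [hcond.1]⟩, rfl⟩

-- the state after A's first loop: each user's set holds the reported-ids of his deduped report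
-- pairs (in first-occurrence order), and the count dict counts deduped pairs per reported id
lemma pvFoldA_char (ms : List (String × String)) :
    (∀ u, ((ms.foldl pvStepA (PySem.Dict.empty, PySem.Dict.empty)).1.getD u PySem.Set.empty)
        = ((PySem.List.dedup ms).filter (fun pr => pr.1 == u)).map Prod.snd)
  ∧ (∀ r, ((ms.foldl pvStepA (PySem.Dict.empty, PySem.Dict.empty)).2.getD r 0)
        = (((PySem.List.dedup ms).map Prod.snd).count r : Int)) := by
  induction ms using List.reverseRecOn with
  | nil =>
    constructor <;> intro x <;>
      simp [PySem.List.dedup_eq_ofList, PySem.Set.ofList_eq_foldl, PySem.Dict.getD,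
        PySem.Dict.get?_empty, PySem.Set.empty]
  | append_singleton ms p ih =>
    obtain ⟨ihu, ihr⟩ := ih
    have hstep : ((ms ++ [p]).foldl pvStepA (PySem.Dict.empty, PySem.Dict.empty))
        = pvStepA (ms.foldl pvStepA (PySem.Dict.empty, PySem.Dict.empty)) p := by
      simp [List.foldl_append]
    set st := ms.foldl pvStepA (PySem.Dict.empty, PySem.Dict.empty) with hst
    have hmem : ((st.1.getD p.1 PySem.Set.empty).contains p.2 = true) ↔ p ∈ PySem.List.dedup ms := by
      rw [PySem.Set.contains_iff, ihu p.1, pv_mem_filter_map_snd]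
    rw [hstep, pv_dedup_append]
    by_cases hp : p ∈ PySem.List.dedup ms
    · rw [if_pos hp]
      have hct : (st.1.getD p.1 PySem.Set.empty).contains p.2 = true := hmem.2 hp
      have hne : st.1.getD p.1 PySem.Set.empty ≠ [] := by
        intro h0
        rw [h0] at hct
        simp [PySem.Set.contains] at hct
      constructor
      · intro u
        simp only [pvStepA, if_pos hne, hct, Bool.true_eq_false, ite_false]
        rw [PySem.Set.add, if_pos hct, PySem.Dict.getD_insert]
        by_cases hu : u = p.1
        · rw [if_pos hu, hu, ihu p.1]
        · rw [if_neg hu, ihu u]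
      · intro r
        simp only [pvStepA, hct]
        simp only [Bool.true_eq_false, ite_false]
        exact ihr r
    · rw [if_neg hp]
      have hcf : (st.1.getD p.1 PySem.Set.empty).contains p.2 = false := by
        cases hcb : (st.1.getD p.1 PySem.Set.empty).contains p.2
        · rfl
        · exact absurd (hmem.1 hcb) hp
      have hns : p.2 ∉ st.1.getD p.1 PySem.Set.empty := by
        rw [ihu p.1]
        intro hmm
        exact hp ((pv_mem_filter_map_snd _ _ _).1 hmm)
      constructor
      · intro u
        simp only [pvStepA]
        have haddeq :
            (if st.1.getD p.1 PySem.Set.empty ≠ [] then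
              st.1.insert p.1 ((st.1.getD p.1 PySem.Set.empty).add p.2)
            else st.1.insert p.1 (PySem.Set.add PySem.Set.empty p.2))
            = st.1.insert p.1 (st.1.getD p.1 PySem.Set.empty ++ [p.2]) := by
          by_cases hne : st.1.getD p.1 PySem.Set.empty ≠ []
          · rw [if_pos hne, PySem.Set.add,
              if_neg (fun h => hns ((PySem.Set.contains_iff _ _).1 h))]
          · have h0 : st.1.getD p.1 PySem.Set.empty = [] := by simpa using hne
            rw [if_neg hne, h0]
            simp [PySem.Set.add, PySem.Set.empty, PySem.Set.contains]
        rw [haddeq, PySem.Dict.getD_insert, List.filter_append, List.map_append]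
        by_cases hu : u = p.1
        · subst hu
          rw [if_pos rfl, ihu p.1]
          simp
        · rw [if_neg hu, ihu u]
          have hbeq : (p.1 == u) = false := by simpa using fun h => hu h.symm
          simp [hbeq]
      · intro r
        simp only [pvStepA, hcf]
        simp only [ite_true]
        rw [PySem.Dict.getD_insert, List.map_append, List.count_append]
        by_cases hr : r = p.2
        · subst hr
          rw [if_pos rfl, ihr p.2]
          push_cast
          simp
        · rw [if_neg hr, ihr r]
          have hc0 : List.count r [p.2] = 0 := by
            simp only [List.count_singleton]
            simpa using fun h => hr h.symm
          simp [hc0]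

-- the single per-input equality the claim asserts
lemma pv_main (id_list : List String) (reports : List String) (k : Int) :
    solution id_list reports k = solution_alt id_list reports k := by
  obtain ⟨ihu, ihr⟩ := pvFoldA_char (reports.map pvToPair)
  have hfoldA : reports.foldl (fun st report => pvStepA st (pvToPair report))
      (PySem.Dict.empty, PySem.Dict.empty)
      = (reports.map pvToPair).foldl pvStepA (PySem.Dict.empty, PySem.Dict.empty) := by
    rw [List.foldl_map]
  have hfoldB : reports.foldl (fun d rep => pvStepB d (pvToPair rep)) PySem.Dict.empty
      = (reports.map pvToPair).foldl pvStepB PySem.Dict.empty := by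
    rw [List.foldl_map]
  simp only [solution, solution_alt]
  rw [hfoldA, hfoldB]
  set st := (reports.map pvToPair).foldl pvStepA (PySem.Dict.empty, PySem.Dict.empty) with hst
  set P := PySem.List.dedup (reports.map pvToPair) with hP
  -- the values list of B's inverted index
  have hvals : ((reports.map pvToPair).foldl pvStepB PySem.Dict.empty).values
      = (PySem.List.dedup ((reports.map pvToPair).map Prod.snd)).map (fun r => pvRep P r) := by
    show ((reports.map pvToPair).foldl pvStepB PySem.Dict.empty).items.map Prod.snd = _
    rw [pvFoldB_items, List.map_map]
    rfl
  set mails0 := id_list.foldl (fun d uid => d.insert uid (0 : Int)) PySem.Dict.empty with hm0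
  have h0get : ∀ u ∈ id_list, mails0.getD u 0 = 0 := by
    intro u hu
    simp only [hm0, PySem.Dict.getD, pvResult0_get?, if_pos hu, Option.getD_some]
  have h0con : ∀ u ∈ id_list, mails0.contains u = true := by
    intro u hu
    rw [hm0, PySem.Dict.contains_eq_isSome_get?, pvResult0_get?, if_pos hu]
    rfl
  have hPnd : P.Nodup := PySem.List.nodup_dedup _
  have hRnd : ∀ r, (pvRep P r).Nodup := by
    intro r
    apply List.Nodup.map_on
    · intro x hx y hy hxy
      have hx2 : x.2 = r := by
        have := (List.mem_filter.1 hx).2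
        simpa using this
      have hy2 : y.2 = r := by
        have := (List.mem_filter.1 hy).2
        simpa using this
      cases x; cases y; simp_all
    · exact hPnd.filter _
  rw [hvals, PySem.List.foldl_append_singleton_eq_map, List.nil_append]
  apply List.map_congr_left
  intro uid hu
  -- A's inner counting loop, as a countP over the deduped pairs of uid
  rw [ihu uid]
  have hfun : (fun (cnt : Int) reported_id =>
        if st.2.getD reported_id 0 ≥ k then cnt + 1 else cnt)
      = (fun (acc : Int) x =>
        if (fun r => decide (st.2.getD r 0 ≥ k)) x = true then acc + 1 else acc) := by
    funext c r; simp
  rw [hfun, PySem.List.foldl_count_if, List.countP_map, List.countP_filter, zero_add]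
  -- B's mails entry, via the banned-group scatter over the values list
  rw [pvBanScatter k _ (by
      intro us hus
      rcases List.mem_map.1 hus with ⟨r, _, hr⟩
      exact hr ▸ hRnd r)
    mails0 uid (h0con uid hu), h0get uid hu, zero_add, List.countP_map]
  -- both sides as countPs over pair/reported-id lists, bridged by pv_count_bridge
  have hlen : ∀ r, PySem.Set.len (pvRep P r) = ((P.map Prod.snd).count r : Int) := by
    intro r
    show ((pvRep P r).length : Int) = _
    rw [pvRep, List.length_map, ← List.countP_eq_length_filter, List.count, List.countP_map]
    simp [Function.comp_def]
  set c : String → Bool := fun r => decide ((((P.map Prod.snd).count r : Int)) ≥ k) with hcdef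
  set K : List String := PySem.List.dedup ((reports.map pvToPair).map Prod.snd) with hKdef
  have hKm : ∀ r, r ∈ K ↔ r ∈ P.map Prod.snd := by
    intro r
    simp [hKdef, hP]
  have hAeq : List.countP
        (fun a => ((fun r => decide (st.2.getD r 0 ≥ k)) ∘ Prod.snd) a && a.1 == uid) P
      = List.countP (fun pr => pr.1 == uid && c pr.2) P := by
    apply List.countP_congr
    intro pr _
    simp only [Function.comp_def, ihr pr.2, hcdef, Bool.and_comm]
  have hBeq : List.countP
        ((fun us => decide (PySem.Set.len us ≥ k) && us.contains uid) ∘ fun r => pvRep P r) K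
      = List.countP (fun r => c r && decide ((uid, r) ∈ P)) K := by
    apply List.countP_congr
    intro r _
    simp only [Function.comp_def]
    have hc1 : decide (PySem.Set.len (pvRep P r) ≥ k) = c r := by
      rw [hlen r]
    have hc2 : (pvRep P r).contains uid = decide ((uid, r) ∈ P) := by
      rw [Bool.eq_iff_iff, PySem.Set.contains_iff, decide_eq_true_eq, pvRep,
        pv_mem_filter_map_fst]
    rw [hc1, hc2]
  rw [hAeq, hBeq]
  exact pv_count_bridge P hPnd uid c K (PySem.List.nodup_dedup _) hKm

-- ===== VERDICT (by name: the statement is the Claim_ definition above) =====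
theorem solution_spec : Claim_equal_solution := by
  intro id_list reports k _hdom _hpre
  unfold Spec_solution
  exact pv_main id_list reports k
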